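-- pv_equiv track=rewrite | github.com/janprz/HackerrankPractice | Search/Medium/TripleSum.py | triplets
-- ===== SOURCE A (Python) =====
-- def triplets(a, b, c):
--     new_a = list(sorted(set(a)))
--     new_c = list(sorted(set(c)))
--     new_b = list(sorted(set(b)))
--     n_triplets = 0
--     ai = 0
--     ci = 0
--     for val in new_b:
--         num_a = ai
--         num_c = ci
--         for val_a in new_a[ai:]:
--             if val_a <= val:
--                 num_a += 1
--                 ai+=1
--             else:
--                 break
--         for val_c in new_c[ci:]:
--             if val_c <= val:
--                 num_c += 1
--                 ci += 1
--             else: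
--                 break
--         n_triplets += num_c * num_a
--     return n_triplets
-- ===== SOURCE B (Python) =====
-- def _bisect_right(xs, x):
--     # hand-written bisect.bisect_right (CPython algorithm); A imports nothing, so no bisect import
--     lo, hi = 0, len(xs)
--     while lo < hi:
--         mid = (lo + hi) // 2
--         if x < xs[mid]:
--             hi = mid
--         else:
--             lo = mid + 1
--     return lo
--
--
-- def triplets(a, b, c):
--     sa = sorted(set(a))
--     sc = sorted(set(c))
--     total = 0
--     for v in set(b):
--         total += _bisect_right(sa, v) * _bisect_right(sc, v)
--     return total
-- ===== Notes on version B (the rewrite author's own statement) =====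
-- stated objective: faster
-- what changed: Replaces A's coordinated two-pointer sweep over sorted b (persistent ai/ci cursors advanced through fresh slices new_a[ai:]/new_c[ci:], each slice a copy) with independent per-value binary searches: b stays an unsorted set and each distinct b-value contributes (#distinct a <= v)*(#distinct c <= v) via a hand-written bisect_right on the sorted deduplicated a and c.
import Mathlib
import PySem

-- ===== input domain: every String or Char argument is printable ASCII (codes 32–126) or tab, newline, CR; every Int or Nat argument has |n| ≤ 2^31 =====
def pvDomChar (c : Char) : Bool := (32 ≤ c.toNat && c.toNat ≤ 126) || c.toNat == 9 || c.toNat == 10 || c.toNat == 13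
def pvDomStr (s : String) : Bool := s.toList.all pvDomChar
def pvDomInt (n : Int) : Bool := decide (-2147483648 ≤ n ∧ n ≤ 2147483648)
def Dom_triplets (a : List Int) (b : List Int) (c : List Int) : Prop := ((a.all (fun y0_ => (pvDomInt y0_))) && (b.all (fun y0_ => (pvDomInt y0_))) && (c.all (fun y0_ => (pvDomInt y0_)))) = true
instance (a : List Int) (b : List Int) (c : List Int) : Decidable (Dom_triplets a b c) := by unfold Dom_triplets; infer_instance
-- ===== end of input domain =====

-- B replaces A's two-pointer sweep over sorted b (which re-slices new_a[ai:]/new_c[ci:] each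
-- iteration) by independent binary-search counts per distinct b value; same count, proven equal.

-- ===== PORT A =====
-- inner 'for val_a in new_a[ai:]: if val_a <= val: … else: break' — number of increments
def countUp : List Int → Int → Nat
  | [], _ => 0
  | x :: t, v => if x ≤ v then countUp t v + 1 else 0

-- 'for val in new_b' with state (ai, ci, n_triplets); the slice new_a[ai:] with the
-- nonnegative cursor ai is exactly List.drop ai (Python slice past the end gives [])
def tripLoop (na nc : List Int) : List Int → Nat → Nat → Int → Int
  | [], _, _, n => n
  | val :: rest, ai, ci, n =>
    let numA := ai + countUp (na.drop ai) val
    let numC := ci + countUp (nc.drop ci) val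
    tripLoop na nc rest numA numC (n + (numC : Int) * (numA : Int))

def triplets (a : List Int) (b : List Int) (c : List Int) : Int :=
  let newA := PySem.List.sorted (PySem.Set.ofList a) (fun x => x)
  let newC := PySem.List.sorted (PySem.Set.ofList c) (fun x => x)
  let newB := PySem.List.sorted (PySem.Set.ofList b) (fun x => x)
  tripLoop newA newC newB 0 0 0

-- ===== PORT B =====
-- Source B's hand-written _bisect_right is literally CPython's bisect.bisect_right loop,
-- which is PySem.List.bisectRight; the fold over set(b) is an order-independent sum.
def triplets_alt (a : List Int) (b : List Int) (c : List Int) : Int :=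
  let sa := PySem.List.sorted (PySem.Set.ofList a) (fun x => x)
  let sc := PySem.List.sorted (PySem.Set.ofList c) (fun x => x)
  (PySem.Set.ofList b).foldl
    (fun total v => total + (PySem.List.bisectRight sa v : Int) * (PySem.List.bisectRight sc v : Int)) 0

-- ===== PRECONDITION & SPEC =====
def Spec_triplets (a : List Int) (b : List Int) (c : List Int) (out : Int) : Prop := out = triplets_alt a b c
instance (a : List Int) (b : List Int) (c : List Int) (out : Int) : Decidable (Spec_triplets a b c out) := by unfold Spec_triplets; infer_instance

-- ===== CLAIM (what is proved, stated in full; the proofs are below) =====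
def Claim_equal_triplets : Prop := ∀ (a : List Int) (b : List Int) (c : List Int), Dom_triplets a b c → Spec_triplets a b c (triplets a b c)

-- ===== LEMMAS AND PROOFS =====

-- number of distinct-list elements ≤ v (the quantity both programs count per b value)
def cntLe (v : Int) (xs : List Int) : Nat := xs.countP (fun x => decide (x ≤ v))

lemma countUp_elem (xs : List Int) (v : Int) :
    ∀ j (h : j < xs.length), j < countUp xs v → xs[j] ≤ v := by
  induction xs with
  | nil => intro j h; simp at h
  | cons x t ih =>
    intro j h hj
    simp only [countUp] at hj
    by_cases hx : x ≤ v
    · simp only [if_pos hx] at hj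
      cases j with
      | zero => simpa using hx
      | succ k =>
        have : k < countUp t v := by omega
        simpa using ih k (by simpa using Nat.lt_of_succ_lt_succ h) this
    · simp [if_neg hx] at hj

lemma countP_take_eq (xs : List Int) (v : Int) (k : Nat) (hk : k ≤ xs.length)
    (h1 : ∀ j (h : j < xs.length), j < k → xs[j] ≤ v) :
    (xs.take k).countP (fun x => decide (x ≤ v)) = k := by
  rw [List.countP_eq_length.2, List.length_take, Nat.min_eq_left hk]
  intro x hx
  obtain ⟨j, hj, rfl⟩ := List.mem_iff_getElem.1 hx
  have hjk : j < k := by simp [List.length_take] at hj; omega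
  have hjl : j < xs.length := lt_of_lt_of_le hjk hk
  have := h1 j hjl hjk
  simpa [List.getElem_take] using this

lemma countP_drop_eq_zero (xs : List Int) (v : Int) (k : Nat)
    (h2 : ∀ j (h : j < xs.length), k ≤ j → ¬ xs[j] ≤ v) :
    (xs.drop k).countP (fun x => decide (x ≤ v)) = 0 := by
  rw [List.countP_eq_zero]
  intro x hx
  obtain ⟨j, hj, rfl⟩ := List.mem_iff_getElem.1 hx
  have hjl : k + j < xs.length := by
    have := hj; simp [List.length_drop] at this; omega
  have := h2 (k + j) hjl (Nat.le_add_right _ _)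
  simpa [List.getElem_drop] using this

lemma cntLe_split (xs : List Int) (v : Int) (k : Nat) :
    cntLe v xs = (xs.take k).countP (fun x => decide (x ≤ v))
      + (xs.drop k).countP (fun x => decide (x ≤ v)) := by
  unfold cntLe
  conv_lhs => rw [← List.take_append_drop k xs]
  rw [List.countP_append]

lemma cntLe_le_length (v : Int) (xs : List Int) : cntLe v xs ≤ xs.length :=
  List.countP_le_length

lemma countUp_sorted (xs : List Int) (v : Int) (h : xs.Pairwise (· ≤ ·)) :
    countUp xs v = cntLe v xs := by
  induction xs with
  | nil => simp [countUp, cntLe]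
  | cons x t ih =>
    have hp := (List.pairwise_cons.1 h)
    by_cases hx : x ≤ v
    · simp [countUp, cntLe, hx, ih hp.2]
    · have ht : t.countP (fun y => decide (y ≤ v)) = 0 := by
        rw [List.countP_eq_zero]
        intro y hy
        have : x ≤ y := hp.1 y hy
        simp; omega
      simp [countUp, cntLe, hx, ht]

-- one inner sweep: from a cursor whose prefix is ≤ v, the sweep lands on cntLe v xs
lemma sweep_eq (xs : List Int) (v : Int) (ai : Nat) (hs : xs.Pairwise (· ≤ ·))
    (hai : ai ≤ xs.length)
    (hpre : ∀ j (h : j < xs.length), j < ai → xs[j] ≤ v) :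
    ai + countUp (xs.drop ai) v = cntLe v xs := by
  have hdrop : (xs.drop ai).Pairwise (· ≤ ·) := List.Pairwise.sublist (List.drop_sublist ai xs) hs
  rw [countUp_sorted _ _ hdrop, cntLe_split xs v ai, countP_take_eq xs v ai hai hpre]
  rfl

lemma bisect_eq_cntLe (xs : List Int) (v : Int) (hs : xs.Pairwise (· ≤ ·)) :
    PySem.List.bisectRight xs v = cntLe v xs := by
  obtain ⟨hle, h1, h2⟩ := PySem.List.bisectRight_spec xs v hs
  rw [cntLe_split xs v (PySem.List.bisectRight xs v),
      countP_take_eq xs v _ hle h1,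
      countP_drop_eq_zero xs v _ (by intro j h hj; have := h2 j h hj; omega)]
  omega

lemma tripLoop_sum (na nc : List Int)
    (hna : na.Pairwise (· ≤ ·)) (hnc : nc.Pairwise (· ≤ ·)) :
    ∀ (bs : List Int) (ai ci : Nat) (n : Int),
    bs.Pairwise (· ≤ ·) →
    ai ≤ na.length → ci ≤ nc.length →
    (∀ v ∈ bs, ∀ j (h : j < na.length), j < ai → na[j] ≤ v) →
    (∀ v ∈ bs, ∀ j (h : j < nc.length), j < ci → nc[j] ≤ v) →
    tripLoop na nc bs ai ci n
      = n + (bs.map (fun v => ((cntLe v nc : Int)) * ((cntLe v na : Int)))).sum := by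
  intro bs
  induction bs with
  | nil => intro ai ci n _ _ _ _ _; simp [tripLoop]
  | cons val rest ih =>
    intro ai ci n hb hai hci hA hC
    have hbrest := (List.pairwise_cons.1 hb).2
    have hvle : ∀ v ∈ rest, val ≤ v := (List.pairwise_cons.1 hb).1
    have hAval := hA val (List.mem_cons_self)
    have hCval := hC val (List.mem_cons_self)
    have eA : ai + countUp (na.drop ai) val = cntLe val na := sweep_eq na val ai hna hai hAval
    have eC : ci + countUp (nc.drop ci) val = cntLe val nc := sweep_eq nc val ci hnc hci hCval
    have hA' : ∀ v ∈ rest, ∀ j (h : j < na.length), j < cntLe val na → na[j] ≤ v := by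
      intro v hv j h hj
      have hjval : na[j] ≤ val := by
        rcases Nat.lt_or_ge j ai with hja | hja
        · exact hAval j h hja
        · have hj' : j - ai < countUp (na.drop ai) val := by omega
          have := countUp_elem (na.drop ai) val (j - ai)
            (by simp [List.length_drop]; omega) hj'
          simpa [List.getElem_drop, Nat.add_sub_cancel' hja] using this
      exact le_trans hjval (hvle v hv)
    have hC' : ∀ v ∈ rest, ∀ j (h : j < nc.length), j < cntLe val nc → nc[j] ≤ v := by
      intro v hv j h hj
      have hjval : nc[j] ≤ val := by
        rcases Nat.lt_or_ge j ci with hjc | hjc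
        · exact hCval j h hjc
        · have hj' : j - ci < countUp (nc.drop ci) val := by omega
          have := countUp_elem (nc.drop ci) val (j - ci)
            (by simp [List.length_drop]; omega) hj'
          simpa [List.getElem_drop, Nat.add_sub_cancel' hjc] using this
      exact le_trans hjval (hvle v hv)
    simp only [tripLoop, eA, eC]
    rw [ih _ _ _ hbrest (eA ▸ cntLe_le_length val na) (eC ▸ cntLe_le_length val nc) hA' hC']
    simp [List.map_cons, List.sum_cons]
    ring

-- ===== VERDICT (by name: the statement is the Claim_ definition above) =====
theorem triplets_spec : Claim_equal_triplets := by
  intro a b c _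
  unfold Spec_triplets triplets triplets_alt
  have hsa : (PySem.List.sorted (PySem.Set.ofList a) (fun x => x)).Pairwise (· ≤ ·) :=
    (PySem.List.sorted_ofList_pairwise_lt a).imp le_of_lt
  have hsc : (PySem.List.sorted (PySem.Set.ofList c) (fun x => x)).Pairwise (· ≤ ·) :=
    (PySem.List.sorted_ofList_pairwise_lt c).imp le_of_lt
  have hsb : (PySem.List.sorted (PySem.Set.ofList b) (fun x => x)).Pairwise (· ≤ ·) :=
    (PySem.List.sorted_ofList_pairwise_lt b).imp le_of_lt
  rw [tripLoop_sum _ _ hsa hsc _ 0 0 0 hsb (Nat.zero_le _) (Nat.zero_le _)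
      (by intro v _ j _ hj; omega) (by intro v _ j _ hj; omega)]
  rw [PySem.List.foldl_add]
  simp only [zero_add]
  have hperm : (PySem.List.sorted (PySem.Set.ofList b) (fun x => x)).Perm (PySem.Set.ofList b) :=
    PySem.List.sorted_perm _ _ _
  rw [List.Perm.sum_eq (hperm.map _)]
  apply congrArg
  apply List.map_congr_left
  intro v _
  rw [bisect_eq_cntLe _ _ hsa, bisect_eq_cntLe _ _ hsc]
  ring
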